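-- pv_equiv track=rewrite | github.com/kristoferfannar/AOC | 2023/11/11.py | findColumnsToAdd
-- ===== SOURCE A (Python) =====
-- def findColumnsToAdd(lines):
--     doubleColumns = []
--     for column in range(len(lines[0])):
--         empty = True
--         for line in lines:
--             if line[column] == "#":
--                 empty = False
--
--         if empty:
--             doubleColumns.append(column)
--
--     return doubleColumns
-- ===== SOURCE B (Python) =====
-- def findColumnsToAdd(lines):
--     present = set()
--     for line in lines:
--         for i, ch in enumerate(line):
--             if ch == "#":
--                 present.add(i)
--     return [c for c in range(len(lines[0])) if c not in present]
-- ===== Notes on version B (the rewrite author's own statement) =====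
-- stated objective: idiomatic
-- what changed: Replaces A's column-major scan with a per-column empty flag (inner loop over all lines for every column) by one row-major pass that collects the set of column indices containing '#', then lists the columns of range(len(lines[0])) not in that set.
import Mathlib
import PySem

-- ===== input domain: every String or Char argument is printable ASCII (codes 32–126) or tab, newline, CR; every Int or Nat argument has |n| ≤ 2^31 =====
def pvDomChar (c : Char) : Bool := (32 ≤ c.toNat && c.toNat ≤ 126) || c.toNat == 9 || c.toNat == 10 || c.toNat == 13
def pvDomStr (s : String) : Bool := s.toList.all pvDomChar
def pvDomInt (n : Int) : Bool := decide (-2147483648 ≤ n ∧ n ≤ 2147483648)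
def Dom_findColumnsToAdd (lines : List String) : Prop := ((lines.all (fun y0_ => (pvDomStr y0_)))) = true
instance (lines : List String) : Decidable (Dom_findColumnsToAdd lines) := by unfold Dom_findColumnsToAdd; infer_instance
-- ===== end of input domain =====

-- B replaces A's column-major per-column empty-flag scan by one row-major pass collecting the
-- set of columns that contain '#', then lists the columns of range(len(lines[0])) not in that set
-- (objective: idiomatic/alternative; same return value wherever A returns).

-- ===== PORT A =====
def findColumnsToAdd (lines : List String) : List Int :=
  (PySem.List.pyRange 0 (PySem.Str.len (PySem.List.pyGetD lines 0 "")) 1).foldl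
    (fun doubleColumns column =>
      let empty := lines.foldl
        (fun empty line =>
          if PySem.Str.pyGet? line column = some '#' then false else empty) true
      if empty then doubleColumns ++ [column] else doubleColumns) []

-- ===== PORT B =====
def findColumnsToAdd_alt (lines : List String) : List Int :=
  let present : PySem.Set Int := lines.foldl
    (fun s line =>
      (PySem.List.enumerate line.toList 0).foldl
        (fun s p => if p.2 = '#' then PySem.Set.add s p.1 else s) s)
    PySem.Set.empty
  (PySem.List.pyRange 0 (PySem.Str.len (PySem.List.pyGetD lines 0 "")) 1).filter
    (fun c => !(PySem.Set.contains present c))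

-- ===== PRECONDITION & SPEC =====
-- Pre_ excludes exactly the inputs where Python A raises: the empty list (lines[0] IndexError)
-- and ragged input where some line is shorter than lines[0] (line[column] IndexError).
def Pre_findColumnsToAdd (lines : List String) : Prop :=
  lines ≠ [] ∧ ∀ line ∈ lines, PySem.Str.len (lines.headD "") ≤ PySem.Str.len line
instance (lines : List String) : Decidable (Pre_findColumnsToAdd lines) := by
  unfold Pre_findColumnsToAdd; infer_instance
def pvWitness_findColumnsToAdd : List String := ["#.", ".."]

def Spec_findColumnsToAdd (lines : List String) (out : List Int) : Prop :=
  out = findColumnsToAdd_alt lines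
instance (lines : List String) (out : List Int) : Decidable (Spec_findColumnsToAdd lines out) := by
  unfold Spec_findColumnsToAdd; infer_instance

-- ===== CLAIM (what is proved, stated in full; the proofs are below) =====
def Claim_equal_findColumnsToAdd : Prop := ∀ (lines : List String), Dom_findColumnsToAdd lines → Pre_findColumnsToAdd lines → Spec_findColumnsToAdd lines (findColumnsToAdd lines)

-- ===== LEMMAS AND PROOFS =====

-- A's inner loop: the empty flag is the conjunction over all lines.
lemma flagA_eq (c : Int) (ls : List String) (b : Bool) :
    ls.foldl (fun e line => if PySem.Str.pyGet? line c = some '#' then false else e) b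
      = (b && ls.all (fun line => !(decide (PySem.Str.pyGet? line c = some '#')))) := by
  induction ls generalizing b with
  | nil => simp
  | cons hd tl ih =>
    simp only [List.foldl_cons, List.all_cons, ih]
    by_cases h : PySem.Str.pyGet? hd c = some '#' <;>
      simp [Bool.and_comm, Bool.and_assoc]

-- membership after B's inner (per-line) loop
lemma mem_inner (ps : List (Int × Char)) (c : Int) (s : PySem.Set Int) :
    (c ∈ ps.foldl (fun s p => if p.2 = '#' then PySem.Set.add s p.1 else s) s)
      ↔ c ∈ s ∨ ∃ p ∈ ps, p.2 = '#' ∧ c = p.1 := by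
  induction ps generalizing s with
  | nil => simp
  | cons hd tl ih =>
    simp only [List.foldl_cons, List.mem_cons]
    by_cases h : hd.2 = '#'
    · rw [if_pos h, ih, PySem.Set.mem_add]
      constructor
      · rintro ((hs | rfl) | ⟨p, hp, hph, rfl⟩)
        · exact Or.inl hs
        · exact Or.inr ⟨hd, Or.inl rfl, h, rfl⟩
        · exact Or.inr ⟨p, Or.inr hp, hph, rfl⟩
      · rintro (hs | ⟨p, (rfl | hp), hph, rfl⟩)
        · exact Or.inl (Or.inl hs)
        · exact Or.inl (Or.inr rfl)
        · exact Or.inr ⟨p, hp, hph, rfl⟩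
    · rw [if_neg h, ih]
      constructor
      · rintro (hs | ⟨p, hp, hph, rfl⟩)
        · exact Or.inl hs
        · exact Or.inr ⟨p, Or.inr hp, hph, rfl⟩
      · rintro (hs | ⟨p, (rfl | hp), hph, rfl⟩)
        · exact Or.inl hs
        · exact absurd hph h
        · exact Or.inr ⟨p, hp, hph, rfl⟩

-- membership in B's `present` set after the whole double loop
lemma mem_present (lines : List String) (c : Int) (s : PySem.Set Int) :
    (c ∈ lines.foldl
        (fun s line =>
          (PySem.List.enumerate line.toList 0).foldl
            (fun s p => if p.2 = '#' then PySem.Set.add s p.1 else s) s) s)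
      ↔ c ∈ s ∨ ∃ line ∈ lines, ∃ p ∈ PySem.List.enumerate line.toList 0, p.2 = '#' ∧ c = p.1 := by
  induction lines generalizing s with
  | nil => simp
  | cons hd tl ih =>
    simp only [List.foldl_cons, ih, mem_inner, List.mem_cons]
    constructor
    · rintro ((hs | ⟨p, hp, hph, rfl⟩) | ⟨l, hl, hle⟩)
      · exact Or.inl hs
      · exact Or.inr ⟨hd, Or.inl rfl, p, hp, hph, rfl⟩
      · exact Or.inr ⟨l, Or.inr hl, hle⟩
    · rintro (hs | ⟨l, (rfl | hl), hle⟩)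
      · exact Or.inl (Or.inl hs)
      · exact Or.inl (Or.inr hle)
      · exact Or.inr ⟨l, hl, hle⟩

-- a '#' at some enumerate position with index c ⟺ the character at (c-s).toNat is '#'
lemma enumerate_hit (xs : List Char) (c : Int) : ∀ s : Int,
    ((∃ p ∈ PySem.List.enumerate xs s, p.2 = '#' ∧ c = p.1)
      ↔ s ≤ c ∧ xs[(c - s).toNat]? = some '#') := by
  induction xs with
  | nil => simp
  | cons hd tl ih =>
    intro s
    rw [PySem.List.enumerate_cons]
    simp only [List.mem_cons]
    constructor
    · rintro ⟨p, hp | hp, hph, hc⟩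
      · subst hp
        simp only at hph hc
        refine ⟨by omega, ?_⟩
        have h0 : (c - s).toNat = 0 := by omega
        rw [h0]
        simp [hph]
      · have h := (ih (s + 1)).mp ⟨p, hp, hph, hc⟩
        refine ⟨by omega, ?_⟩
        have h0 : (c - s).toNat = (c - (s + 1)).toNat + 1 := by omega
        rw [h0, List.getElem?_cons_succ]
        exact h.2
    · rintro ⟨hsc, hget⟩
      by_cases hc : c = s
      · subst hc
        exact ⟨(c, hd), Or.inl rfl, by simpa using hget, rfl⟩
      · have h0 : (c - s).toNat = (c - (s + 1)).toNat + 1 := by omega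
        rw [h0, List.getElem?_cons_succ] at hget
        obtain ⟨p, hp, hph, rfl⟩ := (ih (s + 1)).mpr ⟨by omega, hget⟩
        exact ⟨p, Or.inr hp, hph, rfl⟩

-- Str.pyGet? at a nonnegative index is plain list lookup
lemma str_pyGet?_nonneg (line : String) (c : Int) (hc : 0 ≤ c) :
    PySem.Str.pyGet? line c = line.toList[c.toNat]? := by
  obtain ⟨n, rfl⟩ := Int.eq_ofNat_of_zero_le hc
  simp

-- per-column agreement of the two tests
lemma flag_eq_not_contains (lines : List String) (c : Int) (hc : 0 ≤ c) :
    (lines.all (fun line => !(decide (PySem.Str.pyGet? line c = some '#'))))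
      = !(PySem.Set.contains (lines.foldl
          (fun s line =>
            (PySem.List.enumerate line.toList 0).foldl
              (fun s p => if p.2 = '#' then PySem.Set.add s p.1 else s) s)
          PySem.Set.empty) c) := by
  rw [Bool.eq_iff_iff, List.all_eq_true, Bool.not_eq_true', ← Bool.not_eq_true,
    PySem.Set.contains_iff, mem_present]
  constructor
  · intro h
    rintro (hs | ⟨line, hl, hp⟩)
    · simp [PySem.Set.empty] at hs
    · obtain ⟨-, hg⟩ := (enumerate_hit line.toList c 0).mp hp
      have := h line hl
      rw [str_pyGet?_nonneg line c hc] at this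
      simp only [Bool.not_eq_true', decide_eq_false_iff_not] at this
      exact this (by simpa using hg)
  · intro h line hl
    simp only [Bool.not_eq_true', decide_eq_false_iff_not]
    rw [str_pyGet?_nonneg line c hc]
    intro hg
    exact h (Or.inr ⟨line, hl, (enumerate_hit line.toList c 0).mpr ⟨hc, by simpa using hg⟩⟩)

-- ===== VERDICT (by name: the statement is the Claim_ definition above) =====
theorem findColumnsToAdd_spec : Claim_equal_findColumnsToAdd := by
  intro lines _ _
  unfold Spec_findColumnsToAdd findColumnsToAdd findColumnsToAdd_alt
  rw [PySem.List.foldl_append_if_eq_filter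
    (p := fun column => lines.foldl
      (fun e line => if PySem.Str.pyGet? line column = some '#' then false else e) true)]
  rw [List.nil_append]
  apply List.filter_congr
  intro c hc
  have hc0 : 0 ≤ c := ((PySem.List.mem_pyRange_one).mp hc).1
  rw [flagA_eq]
  simp only [Bool.true_and]
  exact flag_eq_not_contains lines c hc0
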